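-- pv_equiv track=rewrite | github.com/esmondchuah/ml-sentiment-analysis | ml_hmm_p2.py | find_opt_y
-- ===== SOURCE A (Python) =====
-- possible_states = ["O", "B-positive", "I-positive", "B-neutral", "I-neutral", "B-negative", "I-negative"]
--
-- def emis_prob(state, word, training_data):
--     count_emission = 0 # count the emission from state to word
--     count_state = 1
--     count_word = 0
--
--     for tweet in training_data:
--         for j in range(len(tweet)):
--             if tweet[j].split(" ")[0] == word:
--                 count_word += 1
--             if tweet[j].split(" ")[1] == state:
--                 count_state += 1
--                 if tweet[j].split(" ")[0] == word:
--                     count_emission += 1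
--     if count_word == 0:
--         return float(1/count_state)
--
--     return float(count_emission/count_state)
--
-- def find_opt_y(word, training_data):
--     best_y_score = 0
--     opt_y = ""
--     for state in possible_states:
--         y_score = emis_prob(state, word, training_data)
--         if y_score > best_y_score:
--             best_y_score = y_score
--             opt_y = state
--     return opt_y
-- ===== SOURCE B (Python) =====
-- possible_states = ["O", "B-positive", "I-positive", "B-neutral", "I-neutral", "B-negative", "I-negative"]
--
-- def find_opt_y(word, training_data):
--     # single pass: count per-state totals (seeded at 1), per-state emissions of `word`,
--     # and total occurrences of `word`
--     state_count = {s: 1 for s in possible_states}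
--     emission_count = {}
--     count_word = 0
--     for tweet in training_data:
--         for tok in tweet:
--             parts = tok.split(" ")
--             w, s = parts[0], parts[1]
--             state_count[s] = state_count.get(s, 0) + 1
--             if w == word:
--                 count_word += 1
--                 emission_count[s] = emission_count.get(s, 0) + 1
--     best_y_score = 0
--     opt_y = ""
--     for state in possible_states:
--         if count_word == 0:
--             y_score = 1 / state_count[state]
--         else:
--             y_score = emission_count.get(state, 0) / state_count[state]
--         if y_score > best_y_score:
--             best_y_score = y_score
--             opt_y = state
--     return opt_y
-- ===== Notes on version B (the rewrite author's own statement) =====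
-- stated objective: faster
-- what changed: Replaces A's 7 full passes over the data (one emis_prob call per state, each re-splitting every token up to 3 times) with one single pass that builds state/emission counters and a word total, then scores the 7 states from the counters.
import Mathlib
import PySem

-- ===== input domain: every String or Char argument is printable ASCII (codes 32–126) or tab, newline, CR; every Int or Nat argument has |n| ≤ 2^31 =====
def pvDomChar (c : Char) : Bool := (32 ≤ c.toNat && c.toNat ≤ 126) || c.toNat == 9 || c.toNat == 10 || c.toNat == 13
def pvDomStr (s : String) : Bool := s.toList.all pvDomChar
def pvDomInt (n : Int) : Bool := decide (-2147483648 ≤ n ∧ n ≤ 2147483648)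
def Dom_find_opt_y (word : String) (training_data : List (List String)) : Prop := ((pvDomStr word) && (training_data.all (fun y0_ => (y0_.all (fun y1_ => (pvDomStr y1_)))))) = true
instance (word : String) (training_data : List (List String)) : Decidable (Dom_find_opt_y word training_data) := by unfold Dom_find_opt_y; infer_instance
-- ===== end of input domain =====

-- One pass over the data with counters (B) instead of A's seven emis_prob passes; RETURN value equivalence.
-- Python float '/' and '>' on these count ratios are modeled by exact Rat arithmetic in both ports.


-- ===== PORT A =====
-- tok.split(" "): sep " " is nonempty so PySem.Str.split? is always `some`; getD [] never fires
def pvSplit (tok : String) : List String := (PySem.Str.split? tok " ").getD []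

def possible_states : List String := ["O", "B-positive", "I-positive", "B-neutral", "I-neutral", "B-negative", "I-negative"]

-- one step of A's inner loop on token `tok`, state (count_emission, count_state, count_word)
def pvStepA (state word : String) (acc : Int × Int × Int) (tok : String) : Int × Int × Int :=
  let acc1 := if PySem.List.pyGetD (pvSplit tok) 0 "" = word
              then (acc.1, acc.2.1, acc.2.2 + 1) else acc
  if PySem.List.pyGetD (pvSplit tok) 1 "" = state then
    if PySem.List.pyGetD (pvSplit tok) 0 "" = word
    then (acc1.1 + 1, acc1.2.1 + 1, acc1.2.2)
    else (acc1.1, acc1.2.1 + 1, acc1.2.2)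
  else acc1

def emis_prob (state word : String) (training_data : List (List String)) : Rat :=
  let r := training_data.foldl (fun (acc : Int × Int × Int) tweet =>
    (PySem.List.pyRange 0 (tweet.length : Int) 1).foldl
      (fun acc j => pvStepA state word acc (PySem.List.pyGetD tweet j "")) acc) (0, 1, 0)
  if r.2.2 = 0 then (1 : Rat) / (r.2.1 : Rat) else (r.1 : Rat) / (r.2.1 : Rat)

def find_opt_y (word : String) (training_data : List (List String)) : String :=
  (possible_states.foldl (fun (acc : Rat × String) state =>
    let y_score := emis_prob state word training_data
    if acc.1 < y_score then (y_score, state) else acc) ((0 : Rat), "")).2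

-- ===== PORT B =====
-- one step of B's single pass, state (state_count, emission_count, count_word)
def pvStepB (word : String) (acc : PySem.Dict String Int × PySem.Dict String Int × Int)
    (tok : String) : PySem.Dict String Int × PySem.Dict String Int × Int :=
  let parts := pvSplit tok
  let w := PySem.List.pyGetD parts 0 ""
  let s := PySem.List.pyGetD parts 1 ""
  let sc := acc.1.insert s (acc.1.getD s 0 + 1)
  if w = word then (sc, acc.2.1.insert s (acc.2.1.getD s 0 + 1), acc.2.2 + 1)
  else (sc, acc.2.1, acc.2.2)

def find_opt_y_alt (word : String) (training_data : List (List String)) : String :=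
  let init : PySem.Dict String Int :=
    possible_states.foldl (fun d s => d.insert s 1) PySem.Dict.empty
  let st := training_data.foldl (fun acc tweet => tweet.foldl (pvStepB word) acc)
    (init, PySem.Dict.empty, (0 : Int))
  (possible_states.foldl (fun (acc : Rat × String) state =>
    let y_score : Rat :=
      if st.2.2 = 0 then (1 : Rat) / (st.1.getD state 0 : Rat)
      else (st.2.1.getD state 0 : Rat) / (st.1.getD state 0 : Rat)
    if acc.1 < y_score then (y_score, state) else acc) ((0 : Rat), "")).2

-- ===== PRECONDITION & SPEC =====
-- Pre_ excludes exactly the inputs where some token has no space: there both Pythons raise IndexError at split(" ")[1].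
def Pre_find_opt_y (word : String) (training_data : List (List String)) : Prop :=
  ∀ tweet ∈ training_data, ∀ tok ∈ tweet, 2 ≤ (pvSplit tok).length
instance (word : String) (training_data : List (List String)) : Decidable (Pre_find_opt_y word training_data) := by unfold Pre_find_opt_y; infer_instance

def pvWitness_find_opt_y : String × List (List String) :=
  ("cool", [["cool B-positive", "day O"], ["cool O"]])

def Spec_find_opt_y (word : String) (training_data : List (List String)) (out : String) : Prop := out = find_opt_y_alt word training_data
instance (word : String) (training_data : List (List String)) (out : String) : Decidable (Spec_find_opt_y word training_data out) := by unfold Spec_find_opt_y; infer_instance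

-- ===== CLAIM (what is proved, stated in full; the proofs are below) =====
def Claim_equal_find_opt_y : Prop := ∀ (word : String) (training_data : List (List String)), Dom_find_opt_y word training_data → Pre_find_opt_y word training_data → Spec_find_opt_y word training_data (find_opt_y word training_data)

-- ===== LEMMAS AND PROOFS =====

def pvW0 (tok : String) : String := PySem.List.pyGetD (pvSplit tok) 0 ""
def pvS1 (tok : String) : String := PySem.List.pyGetD (pvSplit tok) 1 ""

-- characterization of A's count loop over a flat token list
theorem pvStepA_foldl (state word : String) (toks : List String) (acc : Int × Int × Int) :
    toks.foldl (pvStepA state word) acc =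
      (acc.1 + toks.countP (fun t => pvW0 t = word ∧ pvS1 t = state),
       acc.2.1 + toks.countP (fun t => pvS1 t = state),
       acc.2.2 + toks.countP (fun t => pvW0 t = word)) := by
  induction toks generalizing acc with
  | nil => simp
  | cons t ts ih =>
    simp only [List.foldl_cons, List.countP_cons, ih]
    simp only [pvStepA, pvW0, pvS1]
    split_ifs <;> simp_all <;> omega

-- characterization of B's count loop over a flat token list
theorem pvStepB_foldl (word : String) (toks : List String)
    (acc : PySem.Dict String Int × PySem.Dict String Int × Int) :
    (∀ k : String,
      ((toks.foldl (pvStepB word) acc).1.getD k 0 =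
        acc.1.getD k 0 + toks.countP (fun t => pvS1 t = k)) ∧
      ((toks.foldl (pvStepB word) acc).2.1.getD k 0 =
        acc.2.1.getD k 0 + toks.countP (fun t => pvW0 t = word ∧ pvS1 t = k))) ∧
    (toks.foldl (pvStepB word) acc).2.2 =
      acc.2.2 + toks.countP (fun t => pvW0 t = word) := by
  induction toks generalizing acc with
  | nil => simp
  | cons t ts ih =>
    have ih' := ih (pvStepB word acc t)
    simp only [List.foldl_cons, List.countP_cons]
    refine ⟨fun k => ⟨?_, ?_⟩, ?_⟩
    · rw [(ih'.1 k).1]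
      simp only [pvStepB, pvS1]
      split_ifs with h1 <;>
        (by_cases hk : k = PySem.List.pyGetD (pvSplit t) 1 "" <;>
          simp_all [PySem.Dict.getD_insert] <;> omega)
    · rw [(ih'.1 k).2]
      simp only [pvStepB, pvW0, pvS1]
      split_ifs with h1 <;>
        (by_cases hk : k = PySem.List.pyGetD (pvSplit t) 1 "" <;>
          simp_all [PySem.Dict.getD_insert] <;> omega)
    · rw [ih'.2]
      simp only [pvStepB, pvW0]
      split_ifs with h1 <;> simp_all <;> push_cast <;> omega

theorem emis_prob_eq (state word : String) (td : List (List String)) :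
    emis_prob state word td =
      (if td.flatten.countP (fun t => pvW0 t = word) = 0
       then (1 : Rat) / (1 + (td.flatten.countP (fun t => pvS1 t = state) : Rat))
       else (td.flatten.countP (fun t => pvW0 t = word ∧ pvS1 t = state) : Rat)
            / (1 + (td.flatten.countP (fun t => pvS1 t = state) : Rat))) := by
  unfold emis_prob
  have h1 : td.foldl
      (fun acc tweet => (PySem.List.pyRange 0 (tweet.length : Int) 1).foldl
        (fun acc j => pvStepA state word acc (PySem.List.pyGetD tweet j "")) acc)
      ((0 : Int), (1 : Int), (0 : Int))
      = td.flatten.foldl (pvStepA state word) (0, 1, 0) := by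
    rw [List.foldl_flatten]
    exact (PySem.List.foldl_congr_mem td _ _ _ (fun acc tweet _ =>
      PySem.List.foldl_pyRange_zero_pyGetD' tweet "" (pvStepA state word) acc))
  rw [h1, pvStepA_foldl]
  simp only [zero_add, Int.natCast_eq_zero]
  split_ifs <;> push_cast <;> ring

-- ===== VERDICT (by name: the statement is the Claim_ definition above) =====
theorem find_opt_y_spec : Claim_equal_find_opt_y := by
  intro word td _ _
  unfold Spec_find_opt_y find_opt_y find_opt_y_alt
  dsimp only
  rw [← List.foldl_flatten]
  have hB := pvStepB_foldl word td.flatten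
    (possible_states.foldl (fun d s => d.insert s 1) PySem.Dict.empty, PySem.Dict.empty, 0)
  dsimp only at hB
  refine congrArg Prod.snd ?_
  refine PySem.List.foldl_congr_mem _ _ _ _ ?_
  intro acc st hst
  rw [emis_prob_eq]
  rw [(hB.1 st).1, (hB.1 st).2, hB.2]
  have hinit : (possible_states.foldl (fun d s => d.insert s 1) (PySem.Dict.empty : PySem.Dict String Int)).getD st 0 = 1 := by
    simp only [possible_states] at hst
    fin_cases hst <;> decide
  rw [hinit, PySem.Dict.getD_empty]
  simp only [zero_add, Int.natCast_eq_zero]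
  push_cast
  rfl
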